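-- pv_equiv track=rewrite | github.com/realbikmaev/utilki | utilki/cli.py | sort_versions
-- ===== SOURCE A (Python) =====
-- from typing import Dict, Hashable, List, TypeVar, Tuple
--
-- def version_key(version: str) -> Tuple[int, ...]:
--     return tuple(map(int, version.split(".")))
--
-- def sort_versions(versions: List[str]) -> List[str]:
--     new_versions = []
--
--     for version in versions:
--         try:
--             version_key(version)
--             new_versions.append(version)
--         except ValueError:
--             continue
--
--     new_versions.sort(key=lambda x: version_key(x), reverse=True)
--     return new_versions
-- ===== SOURCE B (Python) =====
-- def version_key(version):
--     return tuple(map(int, version.split(".")))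
--
-- def sort_versions(versions):
--     # online insertion sort: one pass over the input; each parseable version is
--     # inserted directly at its place in a descending-ordered result (equal keys
--     # keep arrival order); a parallel key list avoids re-parsing during scans
--     out = []
--     keys = []  # keys[i] == version_key(out[i])
--     for v in versions:
--         try:
--             k = version_key(v)
--         except ValueError:
--             continue
--         i = 0
--         while i < len(keys) and keys[i] >= k:
--             i += 1
--         keys.insert(i, k)
--         out.insert(i, v)
--     return out
-- ===== Notes on version B (the rewrite author's own statement) =====
-- stated objective: alternative
-- what changed: B drops the separate filter pass and the library sort: in one online pass it inserts each parseable version directly at its place in a descending-ordered result via a linear scan (stable insertion sort), keeping a parallel list of parsed keys so each key is parsed once.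
import Mathlib
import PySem

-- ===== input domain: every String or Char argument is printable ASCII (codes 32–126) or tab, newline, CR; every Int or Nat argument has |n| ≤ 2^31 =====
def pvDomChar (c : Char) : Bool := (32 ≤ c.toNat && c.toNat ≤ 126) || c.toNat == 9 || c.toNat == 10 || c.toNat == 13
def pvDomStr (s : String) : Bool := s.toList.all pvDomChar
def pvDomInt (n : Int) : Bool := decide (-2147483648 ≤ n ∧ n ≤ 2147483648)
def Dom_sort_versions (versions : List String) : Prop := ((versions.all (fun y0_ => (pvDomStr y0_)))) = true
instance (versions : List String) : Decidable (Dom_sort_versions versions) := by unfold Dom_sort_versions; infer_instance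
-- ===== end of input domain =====

-- B replaces filter-then-library-sort by a single online insertion pass (stable for
-- equal keys, keys parsed once via a parallel key list); same return value as A.

-- ===== PORT A =====
-- version_key(v) = tuple(map(int, v.split("."))); none = ValueError
def versionKey? (v : String) : Option (List Int) :=
  ((PySem.Str.split? v ".").getD []).mapM PySem.Int.ofStr?  -- sep "." is nonempty, so split? is always some

def sort_versions (versions : List String) : List String :=
  let new_versions := versions.foldl
    (fun acc v => if (versionKey? v).isSome then acc ++ [v] else acc) []
  PySem.List.sorted new_versions (fun v => (versionKey? v).getD []) true

-- ===== PORT B =====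
-- the while loop 'i = 0; while i < len(keys) and keys[i] >= k: i += 1' (scan for
-- the first key below k; tuple >= is the negation of tuple <)
def findPos (k : List Int) : List (List Int) → Nat
  | [] => 0
  | h :: t => if h < k then 0 else findPos k t + 1

def sort_versions_alt (versions : List String) : List String :=
  let st := versions.foldl
    (fun (st : List String × List (List Int)) v =>
      match versionKey? v with
      | none => st
      | some k =>
        let i := findPos k st.2
        (PySem.List.insert st.1 (i : Int) v, PySem.List.insert st.2 (i : Int) k))
    (([], []) : List String × List (List Int))
  st.1

-- ===== PRECONDITION & SPEC =====
def Spec_sort_versions (versions : List String) (out : List String) : Prop := out = sort_versions_alt versions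
instance (versions : List String) (out : List String) : Decidable (Spec_sort_versions versions out) := by unfold Spec_sort_versions; infer_instance

-- ===== CLAIM (what is proved, stated in full; the proofs are below) =====
def Claim_equal_sort_versions : Prop := ∀ (versions : List String), Dom_sort_versions versions → Spec_sort_versions versions (sort_versions versions)

-- ===== LEMMAS AND PROOFS =====

-- A's sort key
def keyF (v : String) : List Int := (versionKey? v).getD []

-- A's insertion predicate (from PySem.List.sorted_rev_eq_foldl_insertBy)
def predA (a b : String) : Bool := decide (keyF b < keyF a)

lemma findPos_le (k : List Int) (l : List (List Int)) : findPos k l ≤ l.length := by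
  induction l with
  | nil => simp [findPos]
  | cons h t ih =>
    by_cases hc : h < k
    · simp [findPos, hc]
    · simp [findPos, hc]; omega

-- inserting at the scanned position = PySem.List.insertBy with A's predicate,
-- and it preserves the parallel-keys invariant
lemma insert_findPos_eq (v : String) (k : List Int) (hv : versionKey? v = some k)
    (o : List String) :
    PySem.List.insert o ((findPos k (o.map keyF) : Nat) : Int) v
        = PySem.List.insertBy predA v o ∧
    PySem.List.insert (o.map keyF) ((findPos k (o.map keyF) : Nat) : Int) k
        = (PySem.List.insertBy predA v o).map keyF := by
  have hk : keyF v = k := by simp [keyF, hv]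
  induction o with
  | nil =>
    constructor <;> simp [findPos, PySem.List.insertBy, PySem.List.insert_zero, keyF, hv]
  | cons h t ih =>
    by_cases hc : keyF h < k
    · have hfp : findPos k (keyF h :: t.map keyF) = 0 := by simp [findPos, hc]
      have hpred : predA v h = true := by simp [predA, hk, hc]
      constructor
      · rw [List.map_cons, hfp]
        simp [PySem.List.insertBy, hpred, PySem.List.insert_zero]
      · rw [List.map_cons, hfp]
        simp [PySem.List.insertBy, hpred, PySem.List.insert_zero, hk]
    · have hfp : findPos k (keyF h :: t.map keyF) = findPos k (t.map keyF) + 1 := by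
        simp [findPos, hc]
      have hpred : predA v h = false := by simp [predA, hk, hc]
      have hle : findPos k (t.map keyF) ≤ t.length := by
        have := findPos_le k (t.map keyF); simpa using this
      have hsucc :
          PySem.List.insert (h :: t) (((findPos k (t.map keyF) + 1 : Nat)) : Int) v
            = h :: PySem.List.insert t ((findPos k (t.map keyF) : Nat) : Int) v := by
        rw [PySem.List.insert_natCast _ _ _ (by simp; omega),
            PySem.List.insert_natCast _ _ _ (by omega)]
        simp [List.take_succ_cons, List.drop_succ_cons]
      have hsucc2 :
          PySem.List.insert (keyF h :: t.map keyF) (((findPos k (t.map keyF) + 1 : Nat)) : Int) k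
            = keyF h :: PySem.List.insert (t.map keyF) ((findPos k (t.map keyF) : Nat) : Int) k := by
        rw [PySem.List.insert_natCast _ _ _ (by simp; omega),
            PySem.List.insert_natCast _ _ _ (by simp; omega)]
        simp [List.take_succ_cons, List.drop_succ_cons]
      obtain ⟨ih1, ih2⟩ := ih
      constructor
      · rw [List.map_cons, hfp, hsucc, ih1]
        simp [PySem.List.insertBy, hpred]
      · rw [List.map_cons, hfp, hsucc2, ih2]
        simp [PySem.List.insertBy, hpred]

-- the filter loop of A builds versions.filter
lemma filter_foldl (versions : List String) :
    versions.foldl (fun acc v => if (versionKey? v).isSome then acc ++ [v] else acc) []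
      = versions.filter (fun v => (versionKey? v).isSome) := by
  simpa using PySem.List.foldl_append_if (fun v => (versionKey? v).isSome) id versions []

-- B's single fused pass equals the filtered foldl of insertBy, carrying the
-- parallel-keys invariant through the loop state
lemma fold_pairs (versions : List String) (o : List String) :
    versions.foldl
      (fun (st : List String × List (List Int)) v =>
        match versionKey? v with
        | none => st
        | some k =>
          let i := findPos k st.2
          (PySem.List.insert st.1 (i : Int) v, PySem.List.insert st.2 (i : Int) k))
      (o, o.map keyF)
    = (let o' := (versions.filter (fun v => (versionKey? v).isSome)).foldl
        (fun acc v => PySem.List.insertBy predA v acc) o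
       (o', o'.map keyF)) := by
  induction versions generalizing o with
  | nil => simp
  | cons v t ih =>
    cases hv : versionKey? v with
    | none => simpa [hv, List.filter_cons, Option.isSome] using ih o
    | some k =>
      obtain ⟨h1, h2⟩ := insert_findPos_eq v k hv o
      simp only [List.foldl_cons, hv, List.filter_cons, Option.isSome_some, if_true]
      rw [h1, h2]
      exact ih (PySem.List.insertBy predA v o)

-- ===== VERDICT (by name: the statement is the Claim_ definition above) =====
theorem sort_versions_spec : Claim_equal_sort_versions := by
  intro versions _
  unfold Spec_sort_versions sort_versions sort_versions_alt
  simp only []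
  rw [filter_foldl]
  rw [PySem.List.sorted_rev_eq_foldl_insertBy]
  have h := fold_pairs versions []
  simp only [List.map_nil] at h
  rw [h]
  rfl
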